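-- pv_equiv track=rewrite | github.com/mispython/AimanPython | Conv_Py/EIBQADR2.py | extract_postcode
-- ===== SOURCE A (Python) =====
-- def extract_postcode(row: dict) -> str:
--     digits = set("0123456789")
--     for i in range(1, 9):
--         col = f"NAMELN{i}"
--         val = str(row.get(col) or "").ljust(40)
--         first5 = val[:5]
--         if all(c in digits for c in first5) and len(first5) == 5:
--             c6 = val[5:6]
--             c7 = val[6:7]
--             c8 = val[7:8]
--             if c6 == "" or c6 not in digits:
--                 return first5.rjust(7)
--             elif c7 == "" or c7 not in digits:
--                 return val[:6].rjust(7)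
--             elif c8 == "" or c8 not in digits:
--                 return val[:7].rjust(7)
--     return " "   # IF I > 8 THEN POSTCODE = ' '
-- ===== SOURCE B (Python) =====
-- def extract_postcode(row: dict) -> str:
--     for col in ("NAMELN1", "NAMELN2", "NAMELN3", "NAMELN4",
--                 "NAMELN5", "NAMELN6", "NAMELN7", "NAMELN8"):
--         val = (row.get(col) or "").ljust(40)
--         n = 0
--         for c in val:
--             if "0" <= c <= "9":
--                 n += 1
--             else:
--                 break
--         if 5 <= n <= 7:
--             return val[:n].rjust(7)
--     return " "
-- ===== Notes on version B (the rewrite author's own statement) =====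
-- stated objective: simpler
-- what changed: Replaces the all(first5)-plus-cascaded c6/c7/c8 set-membership branches with a single count of the leading ASCII-digit run and one 5<=n<=7 test, iterating the column names directly instead of formatting NAMELN{i} from range(1,9).
import Mathlib
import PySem

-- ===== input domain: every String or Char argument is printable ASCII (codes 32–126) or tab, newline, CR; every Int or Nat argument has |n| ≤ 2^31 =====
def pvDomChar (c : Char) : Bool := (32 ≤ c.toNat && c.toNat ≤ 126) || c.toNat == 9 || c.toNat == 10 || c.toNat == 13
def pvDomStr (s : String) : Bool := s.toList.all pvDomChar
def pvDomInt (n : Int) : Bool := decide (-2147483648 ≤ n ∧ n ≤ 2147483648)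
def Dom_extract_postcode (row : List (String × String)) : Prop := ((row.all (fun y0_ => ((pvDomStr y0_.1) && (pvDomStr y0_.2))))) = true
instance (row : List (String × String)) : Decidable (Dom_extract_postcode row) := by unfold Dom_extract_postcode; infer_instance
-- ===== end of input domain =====

-- B replaces A's all(first5) check plus cascaded c6/c7/c8 set-membership branches by one
-- leading-digit-run count with a single 5 ≤ n ≤ 7 test (objective: simpler).

-- ===== shared string primitives (Python str.ljust / str.rjust on the char list; exact) =====
def pvLjust (cs : List Char) (w : Nat) : List Char := cs ++ List.replicate (w - cs.length) ' '
def pvRjust (cs : List Char) (w : Nat) : List Char := List.replicate (w - cs.length) ' ' ++ cs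

-- ===== PORT A =====
-- digits = set("0123456789")
def pvDigits : List Char := "0123456789".toList
-- "cs in digits" where cs is a string slice of length ≤ 1 and digits a set of 1-char strings (exact)
def pvMemDigits (cs : List Char) : Bool :=
  match cs with
  | [c] => pvDigits.contains c
  | _ => false
-- str(row.get(col) or "") : dict lookup; None and "" both give "" (str of a str is itself)
def pvGetA (row : List (String × String)) (col : String) : String :=
  match (PySem.Dict.mk row).get? col with
  | none => ""
  | some s => if s == "" then "" else s
-- body of A's loop after building val: some r = `return r`, none = fall through to next i
def pvCheckA (val : List Char) : Option String :=
  let first5 := PySem.List.slice val none (some 5)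
  if first5.all pvDigits.contains && (first5.length == 5) then
    let c6 := PySem.List.slice val (some 5) (some 6)
    let c7 := PySem.List.slice val (some 6) (some 7)
    let c8 := PySem.List.slice val (some 7) (some 8)
    if c6 == [] || !(pvMemDigits c6) then some (String.ofList (pvRjust first5 7))
    else if c7 == [] || !(pvMemDigits c7) then
      some (String.ofList (pvRjust (PySem.List.slice val none (some 6)) 7))
    else if c8 == [] || !(pvMemDigits c8) then
      some (String.ofList (pvRjust (PySem.List.slice val none (some 7)) 7))
    else none
  else none
-- for i in range(1, 9): col = f"NAMELN{i}"; val = str(row.get(col) or "").ljust(40); …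
def pvLoopA (row : List (String × String)) : List Int → String
  | [] => " "
  | i :: rest =>
    let col := "NAMELN" ++ PySem.Int.toStr i
    let val := pvLjust (pvGetA row col).toList 40
    match pvCheckA val with
    | some r => r
    | none => pvLoopA row rest

def extract_postcode (row : List (String × String)) : String :=
  pvLoopA row (PySem.List.pyRange 1 9 1)

-- ===== PORT B =====
-- n = length of the leading run of chars with "0" <= c <= "9" (Source B's for/break counter)
def pvCountDigits : List Char → Nat
  | [] => 0
  | c :: cs => if ('0' ≤ c && c ≤ '9') then pvCountDigits cs + 1 else 0
-- for col in ("NAMELN1", …, "NAMELN8"): val = (row.get(col) or "").ljust(40); …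
def pvLoopB (row : List (String × String)) : List String → String
  | [] => " "
  | col :: rest =>
    let val := pvLjust ((row.lookup col).getD "").toList 40
    let n := pvCountDigits val
    if 5 ≤ n && n ≤ 7 then
      String.ofList (pvRjust (PySem.List.slice val none (some (n : Int))) 7)
    else pvLoopB row rest

def extract_postcode_alt (row : List (String × String)) : String :=
  pvLoopB row ["NAMELN1", "NAMELN2", "NAMELN3", "NAMELN4",
               "NAMELN5", "NAMELN6", "NAMELN7", "NAMELN8"]

-- ===== PRECONDITION & SPEC =====
def Spec_extract_postcode (row : List (String × String)) (out : String) : Prop := out = extract_postcode_alt row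
instance (row : List (String × String)) (out : String) : Decidable (Spec_extract_postcode row out) := by unfold Spec_extract_postcode; infer_instance

-- ===== CLAIM (what is proved, stated in full; the proofs are below) =====
def Claim_equal_extract_postcode : Prop := ∀ (row : List (String × String)), Dom_extract_postcode row → Spec_extract_postcode row (extract_postcode row)

-- ===== LEMMAS AND PROOFS =====

theorem pv_digit_eq (c : Char) : pvDigits.contains c = ('0' ≤ c && c ≤ '9') := by
  have h : pvDigits = ['0','1','2','3','4','5','6','7','8','9'] := by decide
  rw [Bool.eq_iff_iff, h]
  simp only [Bool.and_eq_true, decide_eq_true_eq, List.contains_eq_mem, List.mem_cons,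
    List.not_mem_nil, or_false, Char.le_def, Char.ext_iff, UInt32.le_iff_toNat_le,
    ← UInt32.toNat_inj]
  have h0 : ('0' : Char).val.toNat = 48 := rfl
  have h9 : ('9' : Char).val.toNat = 57 := rfl
  have h1 : ('1' : Char).val.toNat = 49 := rfl
  have h2 : ('2' : Char).val.toNat = 50 := rfl
  have h3 : ('3' : Char).val.toNat = 51 := rfl
  have h4 : ('4' : Char).val.toNat = 52 := rfl
  have h5 : ('5' : Char).val.toNat = 53 := rfl
  have h6 : ('6' : Char).val.toNat = 54 := rfl
  have h7 : ('7' : Char).val.toNat = 55 := rfl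
  have h8 : ('8' : Char).val.toNat = 56 := rfl
  omega

theorem pv_digit_mem (c : Char) : c ∈ pvDigits ↔ ('0' ≤ c ∧ c ≤ '9') := by
  have h := pv_digit_eq c
  constructor
  · intro hm
    have h2 : pvDigits.contains c = true := by simpa using hm
    rw [h] at h2; simpa using h2
  · intro hc
    have h2 : ('0' ≤ c && c ≤ '9') = true := by simpa using hc
    rw [← h] at h2; simpa using h2
theorem pv_check_eq (val : List Char) (h : 8 ≤ val.length) :
    pvCheckA val =
      (if 5 ≤ pvCountDigits val && pvCountDigits val ≤ 7 then
        some (String.ofList (pvRjust (PySem.List.slice val none (some ((pvCountDigits val : Nat) : Int))) 7))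
      else none) := by
  rcases val with _|⟨c0,val⟩; · simp at h
  rcases val with _|⟨c1,val⟩; · simp at h
  rcases val with _|⟨c2,val⟩; · simp at h
  rcases val with _|⟨c3,val⟩; · simp at h
  rcases val with _|⟨c4,val⟩; · simp at h
  rcases val with _|⟨c5,val⟩; · simp at h
  rcases val with _|⟨c6,val⟩; · simp at h
  rcases val with _|⟨c7,val⟩; · simp at h
  have s5 : PySem.List.slice (c0::c1::c2::c3::c4::c5::c6::c7::val) none (some 5) = [c0,c1,c2,c3,c4] := by
    rw [PySem.List.slice_to _ (by norm_num), show (Int.toNat 5) = 5 from rfl]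
    simp [List.take_succ_cons]
  have t6 : PySem.List.slice (c0::c1::c2::c3::c4::c5::c6::c7::val) none (some 6) = [c0,c1,c2,c3,c4,c5] := by
    rw [PySem.List.slice_to _ (by norm_num), show (Int.toNat 6) = 6 from rfl]
    simp [List.take_succ_cons]
  have t7 : PySem.List.slice (c0::c1::c2::c3::c4::c5::c6::c7::val) none (some 7) = [c0,c1,c2,c3,c4,c5,c6] := by
    rw [PySem.List.slice_to _ (by norm_num), show (Int.toNat 7) = 7 from rfl]
    simp [List.take_succ_cons]
  have s56 : PySem.List.slice (c0::c1::c2::c3::c4::c5::c6::c7::val) (some 5) (some 6) = [c5] := by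
    rw [PySem.List.slice_toNat _ (by norm_num) (by norm_num),
      show (Int.toNat 5) = 5 from rfl, show (Int.toNat 6) = 6 from rfl]
    simp [List.take_succ_cons, List.drop_succ_cons]
  have s67 : PySem.List.slice (c0::c1::c2::c3::c4::c5::c6::c7::val) (some 6) (some 7) = [c6] := by
    rw [PySem.List.slice_toNat _ (by norm_num) (by norm_num),
      show (Int.toNat 6) = 6 from rfl, show (Int.toNat 7) = 7 from rfl]
    simp [List.take_succ_cons, List.drop_succ_cons]
  have s78 : PySem.List.slice (c0::c1::c2::c3::c4::c5::c6::c7::val) (some 7) (some 8) = [c7] := by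
    rw [PySem.List.slice_toNat _ (by norm_num) (by norm_num),
      show (Int.toNat 7) = 7 from rfl, show (Int.toNat 8) = 8 from rfl]
    simp [List.take_succ_cons, List.drop_succ_cons]
  simp only [pvCheckA, s5, t6, t7, s56, s67, s78, pvMemDigits, pv_digit_eq,
    PySem.List.slice_to_natCast]
  by_cases b0 : ('0' ≤ c0 ∧ c0 ≤ '9')
  · 
    by_cases b1 : ('0' ≤ c1 ∧ c1 ≤ '9')
    · 
      by_cases b2 : ('0' ≤ c2 ∧ c2 ≤ '9')
      · 
        by_cases b3 : ('0' ≤ c3 ∧ c3 ≤ '9')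
        · 
          by_cases b4 : ('0' ≤ c4 ∧ c4 ≤ '9')
          · 
            by_cases b5 : ('0' ≤ c5 ∧ c5 ≤ '9')
            · 
              by_cases b6 : ('0' ≤ c6 ∧ c6 ≤ '9')
              · 
                by_cases b7 : ('0' ≤ c7 ∧ c7 ≤ '9')
                · simp [pvCountDigits, ← Bool.decide_and, b0, b1, b2, b3, b4, b5, b6, b7, pv_digit_mem, List.take_succ_cons]
                · simp [pvCountDigits, ← Bool.decide_and, b0, b1, b2, b3, b4, b5, b6, b7, pv_digit_mem, List.take_succ_cons]
              · simp [pvCountDigits, ← Bool.decide_and, b0, b1, b2, b3, b4, b5, b6, pv_digit_mem, List.take_succ_cons]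
            · simp [pvCountDigits, ← Bool.decide_and, b0, b1, b2, b3, b4, b5, pv_digit_mem, List.take_succ_cons]
          · simp [pvCountDigits, ← Bool.decide_and, b0, b1, b2, b3, b4, pv_digit_mem, List.take_succ_cons]
        · simp [pvCountDigits, ← Bool.decide_and, b0, b1, b2, b3, pv_digit_mem, List.take_succ_cons]
      · simp [pvCountDigits, ← Bool.decide_and, b0, b1, b2, pv_digit_mem, List.take_succ_cons]
    · simp [pvCountDigits, ← Bool.decide_and, b0, b1, pv_digit_mem, List.take_succ_cons]
  · simp [pvCountDigits, ← Bool.decide_and, b0, pv_digit_mem, List.take_succ_cons]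

theorem pv_len_ljust (cs : List Char) : 8 ≤ (pvLjust cs 40).length := by
  simp [pvLjust]; omega

theorem pv_get_eq (row : List (String × String)) (col : String) :
    pvGetA row col = ((row.lookup col).getD "") := by
  unfold pvGetA
  have h : (PySem.Dict.mk row).get? col = row.lookup col := by
    induction row with
    | nil => rfl
    | cons p rest ih =>
      obtain ⟨k, v⟩ := p
      rw [PySem.Dict.get?_mk_cons, List.lookup_cons]
      by_cases hk : col = k
      · subst hk; simp
      · rw [if_neg (by simpa using Ne.symm hk), ih]
        rw [show (col == k) = false from by simpa using hk]
  rw [h]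
  cases hl : row.lookup col with
  | none => rfl
  | some s =>
    by_cases hs : s = ""
    · subst hs; rfl
    · simp [hs]

theorem pv_loop_eq (row : List (String × String)) (is : List Int) :
    pvLoopA row is = pvLoopB row (is.map (fun i => "NAMELN" ++ PySem.Int.toStr i)) := by
  induction is with
  | nil => rfl
  | cons i rest ih =>
    simp only [List.map_cons, pvLoopA, pvLoopB, pv_get_eq, pv_check_eq _ (pv_len_ljust _)]
    by_cases hc : 5 ≤ pvCountDigits (pvLjust ((List.lookup ("NAMELN" ++ PySem.Int.toStr i) row).getD "").toList 40) ∧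
        pvCountDigits (pvLjust ((List.lookup ("NAMELN" ++ PySem.Int.toStr i) row).getD "").toList 40) ≤ 7
    · simp [← Bool.decide_and, hc]
    · simp [← Bool.decide_and, hc, ih]

-- ===== VERDICT (by name: the statement is the Claim_ definition above) =====
theorem extract_postcode_spec : Claim_equal_extract_postcode := by
  intro row _
  unfold Spec_extract_postcode extract_postcode extract_postcode_alt
  rw [show PySem.List.pyRange 1 9 1 = [1,2,3,4,5,6,7,8] from by decide, pv_loop_eq]
  rfl
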